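-- pv_equiv track=rewrite | github.com/Apemiro/ApiglioArcpyTool | src/plot.py | list_enum
-- ===== SOURCE A (Python) =====
-- def list_enum(list_of_list, output_length):
-- 	count_total = len(list_of_list)
-- 	count_of_grp = [len(x) for x in list_of_list]
-- 	acc = [0 for x in range(count_total)]
-- 	result = []
-- 	while len(result)<output_length:
-- 		elem = [(list_of_list[idx][pos]) for idx, pos in enumerate(acc)]
-- 		result.append(elem)
-- 		acc[-1]+=1
-- 		for idx in range(count_total-1,-1,-1):
-- 			if acc[idx]>=count_of_grp[idx]:
-- 				acc[idx]=0
-- 				if idx>0: acc[idx-1]+=1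
-- 	return result
-- ===== SOURCE B (Python) =====
-- def list_enum(list_of_list, output_length):
-- 	# closed-form mixed-radix decomposition per row (no carry counter);
-- 	# same return value as the original wherever it returns
-- 	radices = [len(x) for x in list_of_list]
-- 	rev_radices = radices[::-1]
-- 	result = []
-- 	for i in range(output_length):
-- 		digits = []
-- 		n = i
-- 		for r in rev_radices:
-- 			digits.append(n % r)
-- 			n //= r
-- 		digits.reverse()
-- 		result.append([lst[p] for lst, p in zip(list_of_list, digits)])
-- 	return result
-- ===== Notes on version B (the rewrite author's own statement) =====
-- stated objective: alternative
-- what changed: Replaces the stateful odometer (carry counter mutated across iterations) by a per-row closed-form mixed-radix decomposition: row i's position at slot j is obtained by repeated divmod of i over the reversed radices, so no state is carried between rows.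
import Mathlib
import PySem

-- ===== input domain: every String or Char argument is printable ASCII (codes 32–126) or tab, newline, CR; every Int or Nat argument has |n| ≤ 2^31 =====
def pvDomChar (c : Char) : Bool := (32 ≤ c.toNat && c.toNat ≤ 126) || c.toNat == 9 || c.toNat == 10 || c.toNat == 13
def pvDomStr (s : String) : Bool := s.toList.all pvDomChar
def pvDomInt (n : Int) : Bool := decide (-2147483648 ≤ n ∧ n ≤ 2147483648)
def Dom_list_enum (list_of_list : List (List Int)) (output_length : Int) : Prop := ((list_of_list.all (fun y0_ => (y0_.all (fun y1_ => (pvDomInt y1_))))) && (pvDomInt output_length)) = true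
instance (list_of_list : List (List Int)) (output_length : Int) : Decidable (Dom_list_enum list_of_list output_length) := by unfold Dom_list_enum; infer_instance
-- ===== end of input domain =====

-- B replaces A's stateful carry-counter odometer by a per-row mixed-radix decomposition of the
-- row index (alternative decomposition, same cost); proved equal wherever A returns (Pre_).


-- ===== PORT A =====
-- elem = [(list_of_list[idx][pos]) for idx, pos in enumerate(acc)]
def pvElemA (lol : List (List Int)) (acc : List Int) : List Int :=
  (PySem.List.enumerate acc 0).map (fun ip => PySem.List.pyGetD (PySem.List.pyGetD lol ip.1 []) ip.2 0)

-- acc[-1] += 1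
def pvIncLastA (acc : List Int) : List Int :=
  PySem.List.pySetD acc (-1) (PySem.List.pyGetD acc (-1) 0 + 1)

-- for idx in range(count_total-1,-1,-1): if acc[idx]>=count_of_grp[idx]: acc[idx]=0; if idx>0: acc[idx-1]+=1
def pvCarryA (counts acc : List Int) : List Int :=
  (PySem.List.pyRange ((counts.length : Int) - 1) (-1) (-1)).foldl
    (fun a idx =>
      if PySem.List.pyGetD a idx 0 ≥ PySem.List.pyGetD counts idx 0 then
        let a1 := PySem.List.pySetD a idx 0
        if idx > 0 then PySem.List.pySetD a1 (idx - 1) (PySem.List.pyGetD a1 (idx - 1) 0 + 1) else a1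
      else a) acc

-- while len(result) < output_length: …  (one recursive call per appended row)
def pvLoopA (lol : List (List Int)) (counts : List Int) : Nat → List Int → List (List Int)
  | 0, _ => []
  | n+1, acc => pvElemA lol acc :: pvLoopA lol counts n (pvCarryA counts (pvIncLastA acc))

def list_enum (list_of_list : List (List Int)) (output_length : Int) : List (List Int) :=
  let counts := list_of_list.map (fun x => (x.length : Int))
  pvLoopA list_of_list counts output_length.toNat (List.replicate list_of_list.length 0)

-- ===== PORT B =====
-- for r in rev_radices: digits.append(n % r); n //= r
def pvRevDigitsB : Int → List Int → List Int
  | _, [] => []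
  | n, r :: rs => PySem.Int.mod n r :: pvRevDigitsB (PySem.Int.floordiv n r) rs

-- [lst[p] for lst, p in zip(list_of_list, digits)]
def pvRowB (lol : List (List Int)) (digits : List Int) : List Int :=
  (lol.zip digits).map (fun xp => PySem.List.pyGetD xp.1 xp.2 0)

def list_enum_alt (list_of_list : List (List Int)) (output_length : Int) : List (List Int) :=
  let radices := list_of_list.map (fun x => (x.length : Int))
  (PySem.List.pyRange 0 output_length 1).map (fun i =>
    pvRowB list_of_list ((pvRevDigitsB i radices.reverse).reverse))

-- ===== PRECONDITION & SPEC =====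
-- Pre_ excludes exactly the inputs where A raises IndexError: output_length ≥ 1 together with an
-- empty list_of_list or an empty sublist.
def Pre_list_enum (list_of_list : List (List Int)) (output_length : Int) : Prop :=
  output_length ≤ 0 ∨ (list_of_list ≠ [] ∧ ∀ l ∈ list_of_list, l ≠ [])
instance (list_of_list : List (List Int)) (output_length : Int) : Decidable (Pre_list_enum list_of_list output_length) := by unfold Pre_list_enum; infer_instance
def pvWitness_list_enum : List (List Int) × Int := ([[1, 2], [3]], 3)

def Spec_list_enum (list_of_list : List (List Int)) (output_length : Int) (out : List (List Int)) : Prop := out = list_enum_alt list_of_list output_length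
instance (list_of_list : List (List Int)) (output_length : Int) (out : List (List Int)) : Decidable (Spec_list_enum list_of_list output_length out) := by unfold Spec_list_enum; infer_instance

-- ===== CLAIM (what is proved, stated in full; the proofs are below) =====
def Claim_equal_list_enum : Prop := ∀ (list_of_list : List (List Int)) (output_length : Int), Dom_list_enum list_of_list output_length → Pre_list_enum list_of_list output_length → Spec_list_enum list_of_list output_length (list_enum list_of_list output_length)

-- ===== LEMMAS AND PROOFS =====

-- proof-side view of A's carry sweep: a structural right-to-left pass over the REVERSED lists
def pvIncHead : List Int → List Int
  | [] => []
  | x :: xs => (x + 1) :: xs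

def pvSweep : List Int → List Int → List Int
  | a, [] => a
  | [], _ :: _ => []
  | d :: ds, r :: rs => if d ≥ r then 0 :: pvSweep (pvIncHead ds) rs else d :: pvSweep ds rs

-- the loop body of pvCarryA, named so the foldl can be reasoned about
def pvBody (c : List Int) : List Int → Int → List Int := fun a idx =>
  if PySem.List.pyGetD a idx 0 ≥ PySem.List.pyGetD c idx 0 then
    if idx > 0 then
      PySem.List.pySetD (PySem.List.pySetD a idx 0) (idx - 1)
        (PySem.List.pyGetD (PySem.List.pySetD a idx 0) (idx - 1) 0 + 1)
    else PySem.List.pySetD a idx 0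
  else a

lemma pvCarryA_eq (c a : List Int) :
    pvCarryA c a = (PySem.List.pyRange ((c.length : Int) - 1) (-1) (-1)).foldl (pvBody c) a := rfl

lemma length_pvIncHead (xs : List Int) : (pvIncHead xs).length = xs.length := by
  cases xs <;> simp [pvIncHead]

lemma length_pvRevDigitsB (n : Int) (rs : List Int) : (pvRevDigitsB n rs).length = rs.length := by
  induction rs generalizing n with
  | nil => simp [pvRevDigitsB]
  | cons r rs ih => simp [pvRevDigitsB, ih]

lemma pyGetD_append_left (xs T : List Int) (j : Int) (d : Int) (h0 : 0 ≤ j) (h : j < xs.length) :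
    PySem.List.pyGetD (xs ++ T) j d = PySem.List.pyGetD xs j d := by
  rw [PySem.List.pyGetD_eq_getElem (xs ++ T) d h0 (by simp; omega),
      PySem.List.pyGetD_eq_getElem xs d h0 h]
  rw [List.getElem_append_left]

lemma pySetD_append_left (xs T : List Int) (j : Int) (v : Int) (h0 : 0 ≤ j) (h : j < xs.length) :
    PySem.List.pySetD (xs ++ T) j v = PySem.List.pySetD xs j v ++ T := by
  rw [PySem.List.pySetD_of_nonneg _ _ h0, PySem.List.pySetD_of_nonneg _ _ h0,
      List.set_append_left _ _ (by omega)]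

lemma pyGetD_append_self (xs : List Int) (v d : Int) :
    PySem.List.pyGetD (xs ++ [v]) (xs.length : Int) d = v := by
  rw [PySem.List.pyGetD_eq_getElem _ d (by omega) (by simp)]
  simp

lemma length_pvBody (c X : List Int) (j : Int) (h0 : 0 ≤ j) :
    (pvBody c X j).length = X.length := by
  unfold pvBody
  split_ifs with h1 h2
  · simp [PySem.List.pySetD_of_nonneg _ _ h0,
      PySem.List.pySetD_of_nonneg _ _ (by omega : (0:Int) ≤ j - 1)]
  · simp [PySem.List.pySetD_of_nonneg _ _ h0]
  · rfl

lemma pvBody_append (C D X T : List Int) (j : Int) (h0 : 0 ≤ j) (hX : j < X.length)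
    (hC : X.length = C.length) :
    pvBody (C ++ D) (X ++ T) j = pvBody C X j ++ T := by
  unfold pvBody
  rw [pyGetD_append_left X T j 0 h0 hX, pyGetD_append_left C D j 0 h0 (by omega)]
  split_ifs with h1 h2
  · rw [pySetD_append_left X T j 0 h0 hX]
    have hl : (PySem.List.pySetD X j 0).length = X.length := by
      simp [PySem.List.pySetD_of_nonneg _ _ h0]
    rw [pyGetD_append_left _ T (j-1) 0 (by omega) (by omega),
        pySetD_append_left _ T (j-1) _ (by omega) (by omega)]
  · exact pySetD_append_left X T j 0 h0 hX
  · rfl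

lemma foldl_body_append (k : Nat) : ∀ (j : Int), (j + 1).toNat ≤ k →
    ∀ (X T C D : List Int), j < (X.length : Int) → X.length = C.length →
    (PySem.List.pyRange j (-1) (-1)).foldl (pvBody (C ++ D)) (X ++ T)
      = (PySem.List.pyRange j (-1) (-1)).foldl (pvBody C) X ++ T := by
  induction k with
  | zero =>
    intro j hj X T C D _ _
    rw [PySem.List.pyRange_neg_one_eq_nil (by omega)]
    simp
  | succ k ih =>
    intro j hj X T C D hX hC
    by_cases hneg : j < 0
    · rw [PySem.List.pyRange_neg_one_eq_nil (by omega)]; simp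
    · rw [Int.not_lt] at hneg
      rw [PySem.List.pyRange_neg_one_cons (by omega : (-1:Int) < j)]
      simp only [List.foldl_cons]
      rw [pvBody_append C D X T j hneg (by omega) hC]
      have hlen : (pvBody C X j).length = X.length := length_pvBody C X j hneg
      exact ih (j-1) (by omega) _ T C D (by omega) (by omega)

lemma pvCarry_rev : ∀ (rc ra : List Int), ra.length = rc.length →
    pvCarryA rc.reverse ra.reverse = (pvSweep ra rc).reverse := by
  intro rc
  induction rc with
  | nil =>
    intro ra hlen
    have : ra = [] := List.eq_nil_of_length_eq_zero (by simpa using hlen)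
    subst this
    rw [pvCarryA_eq, PySem.List.pyRange_neg_one_eq_nil (by simp)]
    simp [pvSweep]
  | cons r rc' ih =>
    intro ra hlen
    match ra with
    | [] => simp at hlen
    | d :: ra' =>
      have hm : ra'.length = rc'.length := by simpa using hlen
      rw [pvCarryA_eq]
      rw [show (((r :: rc').reverse.length : Int)) - 1 = (ra'.length : Int) by simp [hm]]
      rw [PySem.List.pyRange_neg_one_cons (by omega : (-1:Int) < (ra'.length : Int))]
      simp only [List.foldl_cons]
      have hrev : (d :: ra').reverse = ra'.reverse ++ [d] := by simp
      have hcrev : (r :: rc').reverse = rc'.reverse ++ [r] := by simp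
      rw [hrev, hcrev]
      have hget_a : PySem.List.pyGetD (ra'.reverse ++ [d]) (ra'.length : Int) 0 = d := by
        rw [show ((ra'.length : Int)) = ((ra'.reverse.length : Nat) : Int) by simp]
        exact pyGetD_append_self _ _ _
      have hget_c : PySem.List.pyGetD (rc'.reverse ++ [r]) (ra'.length : Int) 0 = r := by
        rw [show ((ra'.length : Int)) = ((rc'.reverse.length : Nat) : Int) by simp [hm]]
        exact pyGetD_append_self _ _ _
      have hset1 : PySem.List.pySetD (ra'.reverse ++ [d]) (ra'.length : Int) 0
          = ra'.reverse ++ [0] := by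
        rw [PySem.List.pySetD_of_nonneg _ _ (by omega)]
        rw [show ((ra'.length : Int)).toNat = ra'.reverse.length by simp]
        simp
      have hstep : pvBody (rc'.reverse ++ [r]) (ra'.reverse ++ [d]) (ra'.length : Int)
          = (if d ≥ r then (pvIncHead ra').reverse ++ [(0:Int)] else ra'.reverse ++ [d]) := by
        unfold pvBody
        rw [hget_a, hget_c]
        by_cases hd : d ≥ r
        · rw [if_pos hd, if_pos hd, hset1]
          cases ra' with
          | nil => simp [pvIncHead]
          | cons e ra'' =>
            rw [if_pos (by simp : ((e :: ra'').length : Int) > 0)]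
            have hassoc : (e :: ra'').reverse ++ [(0:Int)] = (ra''.reverse ++ [e]) ++ [0] := by simp
            rw [hassoc]
            have hj : ((e :: ra'').length : Int) - 1 = ((ra''.reverse.length : Nat) : Int) := by simp
            rw [hj]
            rw [pyGetD_append_left (ra''.reverse ++ [e]) [0] _ 0 (by omega) (by simp)]
            rw [show ((ra''.reverse.length : Nat) : Int) = (((ra''.reverse).length : Nat) : Int) by rfl]
            rw [pyGetD_append_self]
            rw [pySetD_append_left (ra''.reverse ++ [e]) [0] _ _ (by omega) (by simp)]
            rw [PySem.List.pySetD_of_nonneg _ _ (by omega)]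
            rw [show (((ra''.reverse.length : Nat) : Int)).toNat = ra''.reverse.length by simp]
            simp [pvIncHead]
        · rw [if_neg hd, if_neg hd]
      rw [hstep]
      by_cases hd : d ≥ r
      · rw [if_pos hd]
        have hXlen : ((pvIncHead ra').reverse).length = ra'.length := by
          simp [length_pvIncHead]
        have hfold := foldl_body_append ra'.length ((ra'.length : Int) - 1) (by omega)
          ((pvIncHead ra').reverse) [0] rc'.reverse [r]
          (by simp [length_pvIncHead]) (by simp [length_pvIncHead, hm])
        rw [hfold]
        have hcarry : (PySem.List.pyRange ((ra'.length : Int) - 1) (-1) (-1)).foldl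
            (pvBody rc'.reverse) ((pvIncHead ra').reverse)
            = pvCarryA rc'.reverse ((pvIncHead ra').reverse) := by
          rw [pvCarryA_eq]
          congr 2
          simp [hm]
        rw [hcarry]
        have := ih (pvIncHead ra') (by simp [length_pvIncHead, hm])
        rw [show (pvIncHead ra').reverse = (pvIncHead ra').reverse by rfl] at this
        rw [this]
        rw [show pvSweep (d :: ra') (r :: rc') = 0 :: pvSweep (pvIncHead ra') rc' by
          rw [pvSweep, if_pos hd]]
        simp
      · rw [if_neg hd]
        have hfold := foldl_body_append ra'.length ((ra'.length : Int) - 1) (by omega)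
          (ra'.reverse) [d] rc'.reverse [r] (by simp) (by simp [hm])
        rw [hfold]
        have hcarry : (PySem.List.pyRange ((ra'.length : Int) - 1) (-1) (-1)).foldl
            (pvBody rc'.reverse) (ra'.reverse)
            = pvCarryA rc'.reverse (ra'.reverse) := by
          rw [pvCarryA_eq]
          congr 2
          simp [hm]
        rw [hcarry, ih ra' hm]
        rw [show pvSweep (d :: ra') (r :: rc') = d :: pvSweep ra' rc' by
          rw [pvSweep, if_neg hd]]
        simp

lemma pvSweep_id : ∀ (ds rs : List Int), List.Forall₂ (fun d r => 0 ≤ d ∧ d < r) ds rs →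
    pvSweep ds rs = ds := by
  intro ds rs h
  induction h with
  | nil => simp [pvSweep]
  | cons hdr _ ih =>
    rename_i d r ds' rs' _
    simp [pvSweep, show ¬ d ≥ r by omega, ih]

lemma pvRevDigitsB_valid : ∀ (rs : List Int), (∀ r ∈ rs, 1 ≤ r) → ∀ (n : Int), 0 ≤ n →
    List.Forall₂ (fun d r => 0 ≤ d ∧ d < r) (pvRevDigitsB n rs) rs := by
  intro rs
  induction rs with
  | nil => intro _ n _; simp [pvRevDigitsB]
  | cons r rs ih =>
    intro hr n hn
    have hrpos : 0 < r := by have := hr r (by simp); omega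
    rw [pvRevDigitsB]
    refine List.Forall₂.cons ?_ (ih (fun x hx => hr x (by simp [hx])) _ ?_)
    · rw [PySem.Int.mod_eq_emod_of_pos hrpos]
      exact ⟨Int.emod_nonneg n (by omega), Int.emod_lt_of_pos n hrpos⟩
    · rw [PySem.Int.floordiv_eq_ediv_of_pos hrpos]
      exact Int.ediv_nonneg hn (by omega)

lemma emod_ediv_decomp (b q r' : Int) (h : 0 < b) (h2 : 0 ≤ r') (h3 : r' < b) :
    (r' + q * b) % b = r' ∧ (r' + q * b) / b = q := by
  constructor
  · simp [Int.add_mul_emod_self_right]; exact Int.emod_eq_of_lt h2 h3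
  · rw [Int.add_mul_ediv_right _ _ (by omega : b ≠ 0), Int.ediv_eq_zero_of_lt h2 h3]; omega

lemma pvSweep_step : ∀ (rs : List Int), (∀ r ∈ rs, 1 ≤ r) → ∀ (n : Int), 0 ≤ n →
    pvSweep (pvIncHead (pvRevDigitsB n rs)) rs = pvRevDigitsB (n + 1) rs := by
  intro rs
  induction rs with
  | nil => intro _ n _; simp [pvRevDigitsB, pvIncHead, pvSweep]
  | cons r rs ih =>
    intro hr n hn
    have hrpos : 0 < r := by have := hr r (by simp); omega
    have hrs : ∀ x ∈ rs, 1 ≤ x := fun x hx => hr x (by simp [hx])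
    rw [pvRevDigitsB, pvRevDigitsB]
    rw [PySem.Int.mod_eq_emod_of_pos hrpos, PySem.Int.mod_eq_emod_of_pos hrpos,
        PySem.Int.floordiv_eq_ediv_of_pos hrpos, PySem.Int.floordiv_eq_ediv_of_pos hrpos]
    set q := n / r with hq
    set d := n % r with hd
    have hd0 : 0 ≤ d := Int.emod_nonneg n (by omega)
    have hdr : d < r := Int.emod_lt_of_pos n hrpos
    have hq0 : 0 ≤ q := Int.ediv_nonneg hn (by omega)
    have hdec : n = r * q + d := by rw [hq, hd]; exact (Int.ediv_add_emod n r).symm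
    rw [pvIncHead]
    by_cases hc : d + 1 ≥ r
    · have hdeq : d = r - 1 := by omega
      have hform : n + 1 = 0 + (q + 1) * r := by rw [hdec, hdeq]; ring
      have hmods := emod_ediv_decomp r (q + 1) 0 hrpos (by omega) (by omega)
      rw [pvSweep, if_pos hc]
      rw [hform, hmods.1, hmods.2]
      rw [ih hrs q hq0]
    · have hform : n + 1 = (d + 1) + q * r := by rw [hdec]; ring
      have hmods := emod_ediv_decomp r q (d + 1) hrpos (by omega) (by omega)
      rw [pvSweep, if_neg hc]
      rw [hform, hmods.1, hmods.2]
      rw [pvSweep_id _ _ (pvRevDigitsB_valid rs hrs q hq0)]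

lemma pvIncLastA_rev (acc : List Int) (h : acc ≠ []) :
    pvIncLastA acc = (pvIncHead acc.reverse).reverse := by
  rcases List.eq_nil_or_concat acc with h0 | ⟨as, x, rfl⟩
  · exact absurd h0 h
  · rw [List.concat_eq_append]
    unfold pvIncLastA
    rw [PySem.List.pyGetD_neg_one_append_singleton]
    have : PySem.List.pySetD (as ++ [x]) (-1) (x + 1) = as ++ [x + 1] := by
      simp [PySem.List.pySetD, PySem.List.pySet?, PySem.List.pyIdx?]
    rw [this]
    simp [pvIncHead]

lemma pvRevDigitsB_zero (rs : List Int) (hr : ∀ r ∈ rs, 1 ≤ r) :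
    pvRevDigitsB 0 rs = List.replicate rs.length 0 := by
  induction rs with
  | nil => simp [pvRevDigitsB]
  | cons r rs ih =>
    have hrpos : 0 < r := by have := hr r (by simp); omega
    rw [pvRevDigitsB, PySem.Int.mod_eq_emod_of_pos hrpos, PySem.Int.floordiv_eq_ediv_of_pos hrpos]
    simp [ih (fun x hx => hr x (by simp [hx])), List.replicate_succ]

lemma pvElemA_eq_row (lol : List (List Int)) (ds : List Int) (hlen : ds.length = lol.length) :
    pvElemA lol ds = pvRowB lol ds := by
  unfold pvElemA pvRowB
  apply List.ext_getElem
  · simp [PySem.List.length_enumerate, hlen]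
  · intro i h1 h2
    simp only [List.getElem_map, PySem.List.getElem_enumerate, List.getElem_zip]
    have hi : i < lol.length := by simp [PySem.List.length_enumerate, hlen] at h1; omega
    congr 1
    rw [show ((0:Int) + (i:Int)) = ((i:Nat):Int) by omega]
    rw [PySem.List.pyGetD_natCast]
    exact List.getD_eq_getElem _ _ hi

-- the loop invariant: starting from the digit vector of k, n more iterations produce rows k…k+n-1
lemma pvLoopA_eq (lol : List (List Int)) (hne : lol ≠ []) (hsub : ∀ l ∈ lol, l ≠ []) :
    ∀ (n : Nat) (k : Int), 0 ≤ k →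
    pvLoopA lol (lol.map fun x => (x.length : Int)) n
      ((pvRevDigitsB k (lol.map fun x => (x.length : Int)).reverse).reverse)
    = (List.range n).map (fun (j : Nat) =>
        pvRowB lol ((pvRevDigitsB (k + (j : Int)) (lol.map fun x => (x.length : Int)).reverse).reverse)) := by
  intro n
  induction n with
  | zero => intro k _; simp [pvLoopA]
  | succ n ih =>
    intro k hk
    set rrs := (lol.map fun x => (x.length : Int)).reverse with hrrs
    have hrrs1 : ∀ r ∈ rrs, 1 ≤ r := by
      intro r hrm
      rw [hrrs, List.mem_reverse, List.mem_map] at hrm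
      obtain ⟨l, hl, rfl⟩ := hrm
      have := hsub l hl
      have : l.length ≠ 0 := by simpa [List.length_eq_zero_iff] using this
      omega
    have hdlen : ((pvRevDigitsB k rrs).reverse).length = lol.length := by
      simp [length_pvRevDigitsB, hrrs]
    rw [pvLoopA]
    rw [pvElemA_eq_row lol _ hdlen]
    have hnonempty : (pvRevDigitsB k rrs).reverse ≠ [] := by
      intro h0
      apply hne
      have hl := congrArg List.length h0
      rw [hdlen] at hl
      simpa [List.length_eq_zero_iff] using hl
    rw [pvIncLastA_rev _ hnonempty, List.reverse_reverse]
    have hcarry : pvCarryA (lol.map fun x => (x.length : Int)) ((pvIncHead (pvRevDigitsB k rrs)).reverse)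
        = (pvRevDigitsB (k + 1) rrs).reverse := by
      have hcounts : (lol.map fun x => (x.length : Int)) = rrs.reverse := by simp [hrrs]
      rw [hcounts]
      rw [pvCarry_rev rrs (pvIncHead (pvRevDigitsB k rrs))
        (by simp [length_pvIncHead, length_pvRevDigitsB])]
      rw [pvSweep_step rrs hrrs1 k hk]
    rw [hcarry]
    rw [ih (k + 1) (by omega)]
    rw [List.range_succ_eq_map, List.map_cons, List.map_map]
    congr 1
    · norm_num
    · apply List.map_congr_left
      intro j _
      simp only [Function.comp_apply]
      congr 3
      push_cast
      ring

-- ===== VERDICT (by name: the statement is the Claim_ definition above) =====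
theorem list_enum_spec : Claim_equal_list_enum := by
  intro lol L _ hPre
  unfold Spec_list_enum
  rw [show list_enum lol L
      = pvLoopA lol (lol.map fun x => (x.length : Int)) L.toNat (List.replicate lol.length 0)
      from rfl]
  rw [show list_enum_alt lol L
      = (PySem.List.pyRange 0 L 1).map (fun i =>
          pvRowB lol ((pvRevDigitsB i (lol.map fun x => (x.length : Int)).reverse).reverse))
      from rfl]
  by_cases hL : L ≤ 0
  · rw [show L.toNat = 0 by omega, PySem.List.pyRange_one_eq_nil hL]
    simp [pvLoopA]
  · rcases hPre with hP | ⟨hne, hsub⟩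
    · omega
    · have hrrs1 : ∀ r ∈ (lol.map fun x => (x.length : Int)).reverse, 1 ≤ r := by
        intro r hrm
        rw [List.mem_reverse, List.mem_map] at hrm
        obtain ⟨l, hl, rfl⟩ := hrm
        have h1 := hsub l hl
        have h2 : l.length ≠ 0 := by simpa [List.length_eq_zero_iff] using h1
        omega
      have hrepl : List.replicate lol.length (0:Int)
          = (pvRevDigitsB 0 ((lol.map fun x => (x.length : Int)).reverse)).reverse := by
        rw [pvRevDigitsB_zero _ hrrs1]; simp
      rw [hrepl, pvLoopA_eq lol hne hsub L.toNat 0 le_rfl]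
      rw [PySem.List.pyRange_zero L, List.map_map]
      apply List.map_congr_left
      intro j _
      simp only [Function.comp_apply]
      congr 3
      omega
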